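-- pv_equiv track=rewrite | github.com/mehdi-essalehy/question-generation-app | Frontend/text_extraction.py | remove_bibliography
-- ===== SOURCE A (Python) =====
-- def remove_bibliography(text):
--     # Look for the start of the bibliography or references section
--     bibliography_keywords = ['references', 'bibliography']
--     start_index = len(text)
--
--     for keyword in bibliography_keywords:
--         # Find the first occurrence of the keyword and remove everything after it
--         keyword_position = text.lower().find(keyword)
--         if keyword_position != -1:
--             start_index = min(start_index, keyword_position)
--
--     # Return the text before the bibliography section
--     cleaned_text = text[:start_index]
--     return cleaned_text
-- ===== SOURCE B (Python) =====
-- def remove_bibliography(text):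
--     # Single left-to-right scan: cut at the first position where either keyword starts.
--     low = text.lower()
--     for i in range(len(low)):
--         if low.startswith("references", i) or low.startswith("bibliography", i):
--             return text[:i]
--     return text
-- ===== Notes on version B (the rewrite author's own statement) =====
-- stated objective: alternative
-- what changed: Replaces the two full substring-search passes combined by min with one left-to-right scan that stops at the first position where either keyword starts.
import Mathlib
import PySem

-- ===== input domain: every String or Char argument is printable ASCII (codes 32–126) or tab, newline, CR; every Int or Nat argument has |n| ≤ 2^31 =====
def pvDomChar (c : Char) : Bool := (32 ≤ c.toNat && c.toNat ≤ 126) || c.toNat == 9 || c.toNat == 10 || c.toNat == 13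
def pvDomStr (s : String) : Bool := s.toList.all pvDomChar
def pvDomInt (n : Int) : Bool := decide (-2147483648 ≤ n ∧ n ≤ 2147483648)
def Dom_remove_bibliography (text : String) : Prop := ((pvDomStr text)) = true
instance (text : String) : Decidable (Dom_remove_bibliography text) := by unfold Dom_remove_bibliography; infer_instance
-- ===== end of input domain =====

-- B changes the algorithm: one left-to-right scan cutting at the first keyword start, instead of two full find scans combined by min.

-- ===== PORT A =====
def remove_bibliography (text : String) : String :=
  let bibliography_keywords : List String := ["references", "bibliography"]
  let start_index : Int :=
    bibliography_keywords.foldl (fun si kw =>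
      let keyword_position := PySem.Str.find (PySem.Str.lower text) kw
      if keyword_position ≠ -1 then min si keyword_position else si)
      (PySem.Str.len text)
  PySem.Str.slice text none (some start_index)

-- ===== PORT B =====
-- the index loop `for i in range(len(low)): if low.startswith(kw, i)` as structural recursion
def cutScan : List Char → Option Nat
  | [] => none
  | c :: t =>
    if PySem.Chars.startswith (c :: t) "references".toList
       || PySem.Chars.startswith (c :: t) "bibliography".toList
    then some 0
    else (cutScan t).map (· + 1)

def remove_bibliography_alt (text : String) : String :=
  match cutScan (PySem.Chars.lower text.toList) with
  | some i => PySem.Str.slice text none (some (i : Int))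
  | none => text

-- ===== PRECONDITION & SPEC =====
def Spec_remove_bibliography (text : String) (out : String) : Prop := out = remove_bibliography_alt text
instance (text : String) (out : String) : Decidable (Spec_remove_bibliography text out) := by unfold Spec_remove_bibliography; infer_instance

-- ===== CLAIM (what is proved, stated in full; the proofs are below) =====
def Claim_equal_remove_bibliography : Prop := ∀ (text : String), Dom_remove_bibliography text → Spec_remove_bibliography text (remove_bibliography text)

-- ===== LEMMAS AND PROOFS =====

-- first index at which `sub` is a prefix of the suffix
def cut1 (sub : List Char) : List Char → Option Nat
  | [] => none
  | c :: t => if sub.isPrefixOf (c :: t) then some 0 else (cut1 sub t).map (· + 1)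

lemma find_go_eq (sub : List Char) (h : sub ≠ []) :
    ∀ (low : List Char) (k : Nat), PySem.Chars.find.go sub low k =
      (match cut1 sub low with | none => (-1 : Int) | some i => (k : Int) + i) := by
  intro low
  induction low with
  | nil => intro k; simp [PySem.Chars.find.go, cut1, List.isEmpty_iff, h]
  | cons c t ih =>
    intro k
    rw [PySem.Chars.find.go]
    by_cases hp : sub.isPrefixOf (c :: t)
    · simp [hp, cut1]
    · simp only [hp, cut1, ih (k + 1), Bool.false_eq_true, if_false]
      cases cut1 sub t
      · simp
      · simp; ring

lemma cut1_lt {sub low : List Char} {i : Nat} (h : cut1 sub low = some i) : i < low.length := by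
  induction low generalizing i with
  | nil => simp [cut1] at h
  | cons c t ih =>
    rw [cut1] at h
    split at h
    · simp only [Option.some.injEq] at h
      simp [← h]
    · simp only [Option.map_eq_some_iff] at h
      obtain ⟨j, hj, rfl⟩ := h
      have := ih hj
      simp only [List.length_cons]
      omega

def combineMin : Option Nat → Option Nat → Option Nat
  | none, o => o
  | some i, none => some i
  | some i, some j => some (min i j)

lemma cutScan_eq (low : List Char) :
    cutScan low = combineMin (cut1 "references".toList low) (cut1 "bibliography".toList low) := by
  induction low with
  | nil => simp [cutScan, cut1, combineMin]
  | cons c t ih =>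
    rw [cutScan, cut1, cut1]
    by_cases h1 : ("references".toList).isPrefixOf (c :: t) <;>
      by_cases h2 : ("bibliography".toList).isPrefixOf (c :: t) <;>
        simp only [PySem.Chars.startswith, h1, h2, ih, Bool.true_or, Bool.or_true,
          Bool.or_self, Bool.false_eq_true, if_true, if_false]
    · rcases cut1 "references".toList t <;> rcases cut1 "bibliography".toList t <;>
        simp [combineMin]
    · rcases cut1 "bibliography".toList t <;> simp [combineMin]
    · rcases cut1 "references".toList t <;> simp [combineMin]
    · rcases cut1 "references".toList t <;> rcases cut1 "bibliography".toList t <;>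
        simp [combineMin, Nat.add_min_add_right]

lemma length_lower (l : List Char) : (PySem.Chars.lower l).length = l.length := by
  simp [PySem.Chars.lower]

theorem remove_bibliography_spec : Claim_equal_remove_bibliography := by
  intro text _
  unfold Spec_remove_bibliography remove_bibliography remove_bibliography_alt
  simp only [List.foldl_cons, List.foldl_nil]
  have hr : PySem.Str.find (PySem.Str.lower text) "references" =
      (match cut1 "references".toList (PySem.Chars.lower text.toList) with
       | none => (-1 : Int) | some i => (i : Int)) := by
    rw [PySem.Str.find, PySem.Chars.find, find_go_eq _ (by decide)]
    simp only [PySem.Str.lower, String.toList_ofList]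
    cases cut1 "references".toList (PySem.Chars.lower text.toList) <;> simp
  have hb : PySem.Str.find (PySem.Str.lower text) "bibliography" =
      (match cut1 "bibliography".toList (PySem.Chars.lower text.toList) with
       | none => (-1 : Int) | some i => (i : Int)) := by
    rw [PySem.Str.find, PySem.Chars.find, find_go_eq _ (by decide)]
    simp only [PySem.Str.lower, String.toList_ofList]
    cases cut1 "bibliography".toList (PySem.Chars.lower text.toList) <;> simp
  rw [cutScan_eq, hr, hb]
  have hn : PySem.Str.len text = (text.toList.length : Int) := by simp [PySem.Str.len]
  have hL : text.toList.length = text.length := String.length_toList (s := text)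
  rcases h1 : cut1 "references".toList (PySem.Chars.lower text.toList) with _ | i <;>
    rcases h2 : cut1 "bibliography".toList (PySem.Chars.lower text.toList) with _ | j <;>
      simp only [combineMin, hn]
  · -- no keyword: A slices at len(text), B returns text
    simp [PySem.Str.slice, PySem.List.slice_to_natCast]
    rw [← String.length_toList (s := text), List.take_length, String.ofList_toList]
  · have hjl : j < text.toList.length := by
      have := cut1_lt h2; rwa [length_lower] at this
    have hne : ((j : Int) ≠ -1) := by omega
    have hmin : min ((text.length : Int)) (j : Int) = (j : Int) := by omega
    simp [hne, hmin]
  · have hil : i < text.toList.length := by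
      have := cut1_lt h1; rwa [length_lower] at this
    have hne : ((i : Int) ≠ -1) := by omega
    have hmin : min ((text.length : Int)) (i : Int) = (i : Int) := by omega
    simp [hne, hmin]
  · have hil : i < text.toList.length := by
      have := cut1_lt h1; rwa [length_lower] at this
    have hjl : j < text.toList.length := by
      have := cut1_lt h2; rwa [length_lower] at this
    have hi : ((i : Int) ≠ -1) := by omega
    have hj : ((j : Int) ≠ -1) := by omega
    have hmin : min (min ((text.length : Int)) (i : Int)) (j : Int) = ((min i j : Nat) : Int) := by
      omega
    simp [hi, hj, hmin]
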